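-- pv_equiv track=rewrite | github.com/yiyabo/GAgent | tool_box/tools_impl/result_interpreter.py | _choose_identifier_column
-- ===== SOURCE A (Python) =====
-- from typing import Any, Dict, List, Optional
--
-- _PROFILE_ID_COLUMN_HINTS = (
--     "phage_id",
--     "gene_id",
--     "entrezid",
--     "entrez_id",
--     "symbol",
--     "sample_id",
--     "feature_id",
--     "accession",
--     "id",
-- )
--
-- def _choose_identifier_column(column_names: List[str]) -> Optional[str]:
--     normalized = [(name, name.strip().lower()) for name in column_names if str(name).strip()]
--     if not normalized:
--         return None
--
--     for hint in _PROFILE_ID_COLUMN_HINTS: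
--         for original, lowered in normalized:
--             if lowered == hint:
--                 return original
--
--     for hint in _PROFILE_ID_COLUMN_HINTS:
--         for original, lowered in normalized:
--             if lowered.endswith(f"_{hint}") or lowered.startswith(f"{hint}_"):
--                 return original
--
--     for original, lowered in normalized:
--         if lowered.endswith("id") or lowered.endswith("_id"):
--             return original
--
--     return normalized[0][0]
-- ===== SOURCE B (Python) =====
-- from typing import List, Optional
--
-- _PROFILE_ID_COLUMN_HINTS = (
--     "phage_id",
--     "gene_id",
--     "entrezid",
--     "entrez_id",
--     "symbol",
--     "sample_id",
--     "feature_id",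
--     "accession",
--     "id",
-- )
--
--
-- def _score(lowered: str) -> int:
--     """Single priority score: exact hint match (0..8), affix hint match (16..24),
--     generic id suffix (32), anything else (48)."""
--     if lowered in _PROFILE_ID_COLUMN_HINTS:
--         return _PROFILE_ID_COLUMN_HINTS.index(lowered)
--     affix = [i for i, h in enumerate(_PROFILE_ID_COLUMN_HINTS)
--              if lowered.endswith("_" + h) or lowered.startswith(h + "_")]
--     if affix:
--         return 16 + affix[0]
--     if lowered.endswith("id"):
--         return 32
--     return 48
--
--
-- def _choose_identifier_column(column_names: List[str]) -> Optional[str]: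
--     normalized = [(name, name.strip().lower()) for name in column_names if str(name).strip()]
--     if not normalized:
--         return None
--     best_name, best_score = normalized[0][0], _score(normalized[0][1])
--     for orig, low in normalized[1:]:
--         s = _score(low)
--         if s < best_score:
--             best_name, best_score = orig, s
--     return best_name
-- ===== Notes on version B (the rewrite author's own statement) =====
-- stated objective: alternative
-- what changed: A's four sequential phases (hint-by-hint exact scan, hint-by-hint affix scan, id-suffix scan, first-element fallback) are replaced by a single pass that assigns each normalized column one numeric priority score and keeps the first column with the minimal score.
import Mathlib
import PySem

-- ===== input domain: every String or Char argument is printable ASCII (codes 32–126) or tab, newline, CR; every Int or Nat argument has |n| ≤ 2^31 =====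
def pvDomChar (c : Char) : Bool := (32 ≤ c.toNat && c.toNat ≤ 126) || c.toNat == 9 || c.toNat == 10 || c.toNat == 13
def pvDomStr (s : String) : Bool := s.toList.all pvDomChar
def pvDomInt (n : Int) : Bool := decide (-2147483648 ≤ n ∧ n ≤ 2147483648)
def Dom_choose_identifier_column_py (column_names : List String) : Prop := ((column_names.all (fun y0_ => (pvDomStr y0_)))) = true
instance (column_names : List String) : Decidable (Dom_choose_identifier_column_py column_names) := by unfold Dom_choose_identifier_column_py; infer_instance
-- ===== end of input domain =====

-- B replaces A's four sequential scans (exact-hint loop, affix-hint loop, id-suffix scan,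
-- first-element fallback) by one pass that scores every column once and keeps the first minimum;
-- objective: alternative (same asymptotic cost, single-pass decomposition).

-- ===== PORT A =====
-- module constant _PROFILE_ID_COLUMN_HINTS (shared data, used by both ports)
def pvHints : List String :=
  ["phage_id", "gene_id", "entrezid", "entrez_id", "symbol",
   "sample_id", "feature_id", "accession", "id"]

-- the comprehension [(name, name.strip().lower()) for name in column_names if str(name).strip()]
-- (shared verbatim by both Pythons)
def pvNormalize (column_names : List String) : List (String × String) :=
  (column_names.filter (fun n => !(PySem.Str.strip n == ""))).map
    (fun n => (n, PySem.Str.lower (PySem.Str.strip n)))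

def pvExactMatch (h : String) (p : String × String) : Bool := p.2 == h

def pvAffixMatch (h : String) (p : String × String) : Bool :=
  PySem.Str.endswith p.2 ("_" ++ h) || PySem.Str.startswith p.2 (h ++ "_")

-- A's 'for hint in hints: for (original, lowered) in normalized: if <match>: return original'
def pvHintLoop (m : String → String × String → Bool) :
    List String → List (String × String) → Option String
  | [], _ => none
  | h :: hs, normalized =>
    match normalized.find? (m h) with
    | some p => some p.1
    | none => pvHintLoop m hs normalized

def choose_identifier_column_py (column_names : List String) : Option String :=
  let normalized := pvNormalize column_names
  if normalized.isEmpty then none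
  else
    match pvHintLoop pvExactMatch pvHints normalized with
    | some original => some original
    | none =>
      match pvHintLoop pvAffixMatch pvHints normalized with
      | some original => some original
      | none =>
        match normalized.find? (fun p =>
            PySem.Str.endswith p.2 "id" || PySem.Str.endswith p.2 "_id") with
        | some p => some p.1
        | none => normalized.head?.map (·.1)

-- ===== PORT B =====
-- Source B's _score: exact hint match 0..8, affix hint match 16..24, id suffix 32, else 48
def pvScore (lowered : String) : Nat :=
  match pvHints.findIdx? (fun h => lowered == h) with
  | some i => i
  | none =>
    match pvHints.findIdx? (fun h =>
        PySem.Str.endswith lowered ("_" ++ h) || PySem.Str.startswith lowered (h ++ "_")) with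
    | some i => 16 + i
    | none => if PySem.Str.endswith lowered "id" then 32 else 48

-- one step of Source B's single pass: keep the strictly better (score) candidate, first wins ties
def pvStep (best : String × Nat) (q : String × String) : String × Nat :=
  let s := pvScore q.2
  if s < best.2 then (q.1, s) else best

def choose_identifier_column_py_alt (column_names : List String) : Option String :=
  match pvNormalize column_names with
  | [] => none
  | p :: rest => some ((rest.foldl pvStep (p.1, pvScore p.2)).1)

-- ===== PRECONDITION & SPEC =====
def Spec_choose_identifier_column_py (column_names : List String) (out : Option String) : Prop := out = choose_identifier_column_py_alt column_names
instance (column_names : List String) (out : Option String) : Decidable (Spec_choose_identifier_column_py column_names out) := by unfold Spec_choose_identifier_column_py; infer_instance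

-- ===== CLAIM (what is proved, stated in full; the proofs are below) =====
def Claim_equal_choose_identifier_column_py : Prop := ∀ (column_names : List String), Dom_choose_identifier_column_py column_names → Spec_choose_identifier_column_py column_names (choose_identifier_column_py column_names)

-- ===== LEMMAS AND PROOFS =====

-- proof-side views of pvScore's two hint lookups
def pvEIdx (x : String) : Option Nat := pvHints.findIdx? (fun h => x == h)

def pvAIdx (x : String) : Option Nat :=
  pvHints.findIdx? (fun h =>
    PySem.Str.endswith x ("_" ++ h) || PySem.Str.startswith x (h ++ "_"))

theorem pvScore_eq (x : String) :
    pvScore x =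
      match pvEIdx x with
      | some i => i
      | none =>
        match pvAIdx x with
        | some i => 16 + i
        | none => if PySem.Str.endswith x "id" then 32 else 48 := rfl

theorem pv_find?_congr {α : Type} (l : List α) (p q : α → Bool)
    (h : ∀ x ∈ l, p x = q x) : l.find? p = l.find? q := by
  induction l with
  | nil => rfl
  | cons a t ih =>
    simp only [List.find?_cons]
    rw [h a (List.mem_cons_self)]
    cases q a
    · exact ih (fun x hx => h x (List.mem_cons_of_mem _ hx))
    · rfl

theorem pv_findIdx?_lt {α : Type} (p : α → Bool) (l : List α) (i : Nat)
    (h : l.findIdx? p = some i) : i < l.length := by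
  induction l generalizing i with
  | nil => exact absurd h (by simp)
  | cons a t ih =>
    rw [List.findIdx?_cons] at h
    by_cases hp : p a = true
    · rw [if_pos hp] at h
      have : i = 0 := by simpa using h.symm
      simp [this]
    · rw [if_neg hp] at h
      obtain ⟨j, hj, hji⟩ : ∃ j, t.findIdx? p = some j ∧ j + 1 = i := by
        cases ht : t.findIdx? p <;> rw [ht] at h <;> simp at h
        · exact ⟨_, rfl, h⟩
      have := ih j hj
      simp only [List.length_cons]
      omega

theorem pv_endswith_id (x : String) (h : PySem.Str.endswith x "_id" = true) :
    PySem.Str.endswith x "id" = true := by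
  simp only [PySem.Str.endswith_eq] at h ⊢
  rw [PySem.Chars.endswith_iff] at h ⊢
  have hs : ("id".toList) <:+ ("_id".toList) := by decide
  exact hs.trans h

-- the exhaustive case description of pvScore
theorem pvScore_cases (x : String) :
    (pvEIdx x = some (pvScore x) ∧ pvScore x ≤ 8) ∨
    (pvEIdx x = none ∧ pvAIdx x = some (pvScore x - 16) ∧ 16 ≤ pvScore x ∧ pvScore x ≤ 24) ∨
    (pvEIdx x = none ∧ pvAIdx x = none ∧ PySem.Str.endswith x "id" = true ∧ pvScore x = 32) ∨
    (pvEIdx x = none ∧ pvAIdx x = none ∧ PySem.Str.endswith x "id" = false ∧ pvScore x = 48) := by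
  have h9 : pvHints.length = 9 := rfl
  cases he : pvEIdx x with
  | some i =>
    have hs : pvScore x = i := by rw [pvScore_eq, he]
    have hlt : i < pvHints.length := pv_findIdx?_lt _ _ _ he
    left
    rw [hs]
    exact ⟨rfl, by omega⟩
  | none =>
    cases ha : pvAIdx x with
    | some i =>
      have hs : pvScore x = 16 + i := by rw [pvScore_eq, he, ha]
      have hlt : i < pvHints.length := pv_findIdx?_lt _ _ _ ha
      right; left
      rw [hs]
      exact ⟨rfl, by congr 1; omega, by omega, by omega⟩
    | none =>
      cases hid : PySem.Str.endswith x "id" with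
      | true =>
        have hs : pvScore x = 32 := by rw [pvScore_eq, he, ha, hid]; rfl
        right; right; left
        exact ⟨rfl, rfl, rfl, hs⟩
      | false =>
        have hs : pvScore x = 48 := by rw [pvScore_eq, he, ha, hid]; rfl
        right; right; right
        exact ⟨rfl, rfl, rfl, hs⟩

theorem pvScore_le (x : String) : pvScore x ≤ 48 := by
  rcases pvScore_cases x with ⟨_, h⟩ | ⟨_, _, _, h⟩ | ⟨_, _, _, h⟩ | ⟨_, _, _, h⟩ <;> omega

theorem pvEIdx_of_score (x : String) (i : Nat) (h : pvEIdx x = some i) : pvScore x = i := by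
  rcases pvScore_cases x with ⟨h', _⟩ | ⟨h', _⟩ | ⟨h', _⟩ | ⟨h', _⟩
  · rw [h'] at h; exact Option.some.inj h
  all_goals (rw [h'] at h; cases h)

-- minimum score over a normalized list (1000 = "empty")
def pvMins (l : List (String × String)) : Nat :=
  l.foldr (fun q a => min (pvScore q.2) a) 1000

theorem pvMins_cons (a : String × String) (t : List (String × String)) :
    pvMins (a :: t) = min (pvScore a.2) (pvMins t) := rfl

theorem pvMins_le {l : List (String × String)} {q : String × String} (h : q ∈ l) :
    pvMins l ≤ pvScore q.2 := by
  induction l with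
  | nil => cases h
  | cons a t ih =>
    rw [pvMins_cons]
    rcases List.mem_cons.mp h with rfl | h
    · omega
    · have := ih h; omega

theorem pvMins_ach {l : List (String × String)} (h : l ≠ []) :
    ∃ q ∈ l, pvScore q.2 = pvMins l := by
  induction l with
  | nil => exact absurd rfl h
  | cons a t ih =>
    rw [pvMins_cons]
    rcases eq_or_ne t [] with rfl | ht
    · exact ⟨a, List.mem_cons_self, by simp [pvMins]; have := pvScore_le a.2; omega⟩
    · obtain ⟨q, hq, hsc⟩ := ih ht
      by_cases hle : pvScore a.2 ≤ pvMins t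
      · exact ⟨a, List.mem_cons_self, by omega⟩
      · exact ⟨q, List.mem_cons_of_mem _ hq, by omega⟩

theorem pvFold_ge (t : List (String × String)) (n : String) (s : Nat)
    (h : ∀ q ∈ t, s ≤ pvScore q.2) : t.foldl pvStep (n, s) = (n, s) := by
  induction t with
  | nil => rfl
  | cons a t ih =>
    have ha := h a List.mem_cons_self
    simp only [List.foldl_cons, pvStep]
    rw [if_neg (by omega)]
    exact ih (fun q hq => h q (List.mem_cons_of_mem _ hq))

theorem pvFold_lt (t : List (String × String)) :
    ∀ (n : String) (s : Nat), pvMins t < s → pvMins t < 1000 →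
    ∃ q, t.find? (fun q => pvScore q.2 == pvMins t) = some q ∧
      t.foldl pvStep (n, s) = (q.1, pvMins t) := by
  induction t with
  | nil => intro n s h hb; simp [pvMins] at hb
  | cons a t ih =>
    intro n s h hb
    rw [pvMins_cons] at h hb ⊢
    simp only [List.foldl_cons, List.find?_cons]
    by_cases hle : pvScore a.2 ≤ pvMins t
    · -- head achieves the minimum
      have hmin : min (pvScore a.2) (pvMins t) = pvScore a.2 := by omega
      rw [hmin] at h ⊢
      refine ⟨a, by simp, ?_⟩
      simp only [pvStep]
      rw [if_pos (by omega)]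
      exact pvFold_ge t a.1 (pvScore a.2) (fun q hq => le_trans hle (pvMins_le hq))
    · -- minimum lies strictly inside the tail
      have hmin : min (pvScore a.2) (pvMins t) = pvMins t := by omega
      rw [hmin] at h ⊢
      have hbt : pvMins t < 1000 := by omega
      have hpa : (pvScore a.2 == pvMins t) = false := by simp; omega
      rw [hpa]
      simp only [pvStep]
      by_cases hlt : pvScore a.2 < s
      · rw [if_pos hlt]
        exact ih a.1 (pvScore a.2) (by omega) hbt
      · rw [if_neg hlt]
        exact ih n s h hbt

-- the common characterisation: the original of the FIRST minimal-score pair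
def pvFamin (l : List (String × String)) : Option String :=
  (l.find? (fun q => pvScore q.2 == pvMins l)).map (·.1)

theorem pvAlt_famin (p : String × String) (rest : List (String × String)) :
    pvFamin (p :: rest) = some ((rest.foldl pvStep (p.1, pvScore p.2)).1) := by
  unfold pvFamin
  rw [pvMins_cons]
  by_cases h : pvMins rest < pvScore p.2
  · have hmin : min (pvScore p.2) (pvMins rest) = pvMins rest := by omega
    rw [hmin]
    have hb : pvMins rest < 1000 := lt_of_lt_of_le h (le_trans (pvScore_le p.2) (by omega))
    obtain ⟨q, hfind, hfold⟩ := pvFold_lt rest p.1 (pvScore p.2) h hb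
    rw [hfold]
    simp only [List.find?_cons]
    have hp : (pvScore p.2 == pvMins rest) = false := by simp; omega
    rw [hp, hfind]
    rfl
  · have hmin : min (pvScore p.2) (pvMins rest) = pvScore p.2 := by omega
    rw [hmin]
    rw [pvFold_ge rest p.1 (pvScore p.2) (fun q hq => le_trans (by omega) (pvMins_le hq))]
    simp only [List.find?_cons]
    rw [show (pvScore p.2 == pvScore p.2) = true by simp]
    rfl

-- the hint-index of a pair under a given match function
def pvIdx (m : String → String × String → Bool) (hs : List String) (q : String × String) :
    Option Nat := hs.findIdx? (fun h => m h q)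

theorem pvHintLoop_none (m : String → String × String → Bool) (hs : List String)
    (l : List (String × String)) (h : ∀ q ∈ l, pvIdx m hs q = none) :
    pvHintLoop m hs l = none := by
  induction hs with
  | nil => rfl
  | cons a t ih =>
    have hnone : l.find? (m a) = none := by
      rw [List.find?_eq_none]
      intro q hq
      have := h q hq
      unfold pvIdx at this
      rw [List.findIdx?_cons] at this
      by_cases hma : m a q = true
      · simp [hma] at this
      · simp [hma]
    unfold pvHintLoop
    rw [hnone]
    exact ih (fun q hq => by
      have := h q hq
      unfold pvIdx at this ⊢
      rw [List.findIdx?_cons] at this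
      by_cases hma : m a q = true
      · simp [hma] at this
      · simp [hma] at this; simpa using this)

theorem pvHintLoop_min (m : String → String × String → Bool) (hs : List String)
    (l : List (String × String)) :
    ∀ (j : Nat), (∃ q ∈ l, pvIdx m hs q = some j) →
    (∀ q ∈ l, ∀ i, pvIdx m hs q = some i → j ≤ i) →
    pvHintLoop m hs l = (l.find? (fun q => pvIdx m hs q == some j)).map (·.1) := by
  induction hs with
  | nil =>
    intro j hex _
    obtain ⟨q, _, hq⟩ := hex
    rw [show pvIdx m [] q = none from rfl] at hq
    cases hq
  | cons a t ih =>
    intro j hex hmin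
    by_cases hany : ∃ q ∈ l, m a q = true
    · -- some pair matches the first hint: j = 0 and the loop stops at hint a
      obtain ⟨q₁, hq₁, hm₁⟩ := hany
      have hidx₁ : pvIdx m (a :: t) q₁ = some 0 := by
        unfold pvIdx; rw [List.findIdx?_cons, if_pos hm₁]
      have hj : j = 0 := Nat.le_zero.mp (hmin q₁ hq₁ 0 hidx₁)
      subst hj
      have hcongr : l.find? (fun q => pvIdx m (a :: t) q == some 0) = l.find? (m a) := by
        apply pv_find?_congr
        intro q _
        unfold pvIdx
        rw [List.findIdx?_cons]
        by_cases hma : m a q = true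
        · simp [hma]
        · simp [hma]
      rw [hcongr]
      have hsome : (l.find? (m a)).isSome := List.find?_isSome.mpr ⟨q₁, hq₁, hm₁⟩
      obtain ⟨q₀, hq₀⟩ := Option.isSome_iff_exists.mp hsome
      unfold pvHintLoop
      rw [hq₀]
      rfl
    · -- no pair matches the first hint: shift indices and recurse
      have hall : ∀ q ∈ l, m a q = false := fun q hq => by
        cases hmq : m a q
        · rfl
        · exact absurd ⟨q, hq, hmq⟩ hany
      have hshift : ∀ q ∈ l, pvIdx m (a :: t) q = (pvIdx m t q).map (· + 1) := by
        intro q hq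
        unfold pvIdx
        rw [List.findIdx?_cons, if_neg (by rw [hall q hq]; simp)]
      obtain ⟨q₁, hq₁, hidx₁⟩ := hex
      rw [hshift q₁ hq₁] at hidx₁
      obtain ⟨j', hj', hjeq⟩ : ∃ j', pvIdx m t q₁ = some j' ∧ j = j' + 1 := by
        cases hi : pvIdx m t q₁ <;> rw [hi] at hidx₁ <;> simp at hidx₁
        · exact ⟨_, rfl, hidx₁.symm⟩
      have hj1 : 1 ≤ j := by omega
      have hmin' : ∀ q ∈ l, ∀ i, pvIdx m t q = some i → j' ≤ i := by
        intro q hq i hi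
        have : pvIdx m (a :: t) q = some (i + 1) := by rw [hshift q hq, hi]; rfl
        have := hmin q hq (i + 1) this
        omega
      have hrec := ih j' ⟨q₁, hq₁, hj'⟩ hmin'
      have hnone : l.find? (m a) = none := List.find?_eq_none.mpr (fun q hq => by
        rw [hall q hq]; simp)
      have hcongr2 : l.find? (fun q => pvIdx m (a :: t) q == some j)
          = l.find? (fun q => pvIdx m t q == some j') := by
        apply pv_find?_congr
        intro q hq
        rw [hshift q hq, hjeq]
        cases pvIdx m t q <;> simp
      unfold pvHintLoop
      rw [hnone, hrec, hcongr2]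

-- pvIdx at the concrete match functions IS pvScore's lookup
theorem pvIdx_exact (q : String × String) : pvIdx pvExactMatch pvHints q = pvEIdx q.2 := rfl

theorem pvIdx_affix (q : String × String) : pvIdx pvAffixMatch pvHints q = pvAIdx q.2 := rfl

-- A's phase chain computes the first minimal-score original
theorem pvA_famin (l : List (String × String)) (hne : l ≠ []) :
    (match pvHintLoop pvExactMatch pvHints l with
     | some original => some original
     | none =>
       match pvHintLoop pvAffixMatch pvHints l with
       | some original => some original
       | none =>
         match l.find? (fun p =>
             PySem.Str.endswith p.2 "id" || PySem.Str.endswith p.2 "_id") with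
         | some p => some p.1
         | none => l.head?.map (·.1)) = pvFamin l := by
  obtain ⟨q₀, hq₀, hsc⟩ := pvMins_ach hne
  rcases pvScore_cases q₀.2 with ⟨he, hle⟩ | ⟨he, ha, h16, h24⟩ | ⟨he, ha, hid, h32⟩ | ⟨he, ha, hid, h48⟩
  · -- phase 0: some exact match exists, pvMins l ≤ 8
    rw [hsc] at he hle
    have hloop : pvHintLoop pvExactMatch pvHints l
        = (l.find? (fun q => pvIdx pvExactMatch pvHints q == some (pvMins l))).map (·.1) := by
      apply pvHintLoop_min
      · exact ⟨q₀, hq₀, by rw [pvIdx_exact]; exact he⟩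
      · intro q hq i hi
        rw [pvIdx_exact] at hi
        have := pvEIdx_of_score q.2 i hi
        have := pvMins_le hq
        omega
    have hcongr : l.find? (fun q => pvIdx pvExactMatch pvHints q == some (pvMins l))
        = l.find? (fun q => pvScore q.2 == pvMins l) := by
      apply pv_find?_congr
      intro q hq
      rw [pvIdx_exact]
      rcases pvScore_cases q.2 with ⟨he', hle'⟩ | ⟨he', _, h16', _⟩ | ⟨he', _, _, h'⟩ | ⟨he', _, _, h'⟩ <;>
        rw [he'] <;> simp <;> omega
    rw [hcongr] at hloop
    have hsome : (l.find? (fun q => pvScore q.2 == pvMins l)).isSome :=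
      List.find?_isSome.mpr ⟨q₀, hq₀, by simp [hsc]⟩
    obtain ⟨p, hp⟩ := Option.isSome_iff_exists.mp hsome
    rw [hloop, hp]
    unfold pvFamin
    rw [hp]
    rfl
  · -- phase 1: no exact match, some affix match, 16 ≤ pvMins l ≤ 24
    rw [hsc] at ha h16 h24
    have hEnone : ∀ q ∈ l, pvEIdx q.2 = none := by
      intro q hq
      rcases pvScore_cases q.2 with ⟨he', hle'⟩ | ⟨he', _⟩ | ⟨he', _⟩ | ⟨he', _⟩
      · exact absurd (pvMins_le hq) (by omega)
      all_goals exact he'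
    have hexact : pvHintLoop pvExactMatch pvHints l = none :=
      pvHintLoop_none _ _ _ (fun q hq => by rw [pvIdx_exact]; exact hEnone q hq)
    have hloop : pvHintLoop pvAffixMatch pvHints l
        = (l.find? (fun q => pvIdx pvAffixMatch pvHints q == some (pvMins l - 16))).map (·.1) := by
      apply pvHintLoop_min
      · exact ⟨q₀, hq₀, by rw [pvIdx_affix]; exact ha⟩
      · intro q hq i hi
        rw [pvIdx_affix] at hi
        rcases pvScore_cases q.2 with ⟨he', _⟩ | ⟨_, ha', h16', _⟩ | ⟨_, ha', _⟩ | ⟨_, ha', _⟩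
        · rw [hEnone q hq] at he'; cases he'
        · rw [ha'] at hi
          have := pvMins_le hq
          have := Option.some.inj hi
          omega
        all_goals (rw [ha'] at hi; cases hi)
    have hcongr : l.find? (fun q => pvIdx pvAffixMatch pvHints q == some (pvMins l - 16))
        = l.find? (fun q => pvScore q.2 == pvMins l) := by
      apply pv_find?_congr
      intro q hq
      rw [pvIdx_affix]
      rcases pvScore_cases q.2 with ⟨he', _⟩ | ⟨_, ha', h16', h24'⟩ | ⟨_, ha', _, h'⟩ | ⟨_, ha', _, h'⟩
      · rw [hEnone q hq] at he'; cases he'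
      · rw [ha']; simp; omega
      all_goals (rw [ha', h']; simp; omega)
    rw [hcongr] at hloop
    have hsome : (l.find? (fun q => pvScore q.2 == pvMins l)).isSome :=
      List.find?_isSome.mpr ⟨q₀, hq₀, by simp [hsc]⟩
    obtain ⟨p, hp⟩ := Option.isSome_iff_exists.mp hsome
    rw [hexact, hloop, hp]
    unfold pvFamin
    rw [hp]
    rfl
  · -- phase 2: only generic id suffixes, pvMins l = 32
    rw [hsc] at h32
    have hall : ∀ q ∈ l, pvEIdx q.2 = none ∧ pvAIdx q.2 = none := by
      intro q hq
      have hge := pvMins_le hq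
      rcases pvScore_cases q.2 with ⟨_, h'⟩ | ⟨_, _, _, h'⟩ | ⟨he', ha', _⟩ | ⟨he', ha', _⟩
      · omega
      · omega
      all_goals exact ⟨he', ha'⟩
    have hexact : pvHintLoop pvExactMatch pvHints l = none :=
      pvHintLoop_none _ _ _ (fun q hq => by rw [pvIdx_exact]; exact (hall q hq).1)
    have haffix : pvHintLoop pvAffixMatch pvHints l = none :=
      pvHintLoop_none _ _ _ (fun q hq => by rw [pvIdx_affix]; exact (hall q hq).2)
    have hcongr : l.find? (fun p =>
          PySem.Str.endswith p.2 "id" || PySem.Str.endswith p.2 "_id")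
        = l.find? (fun q => pvScore q.2 == pvMins l) := by
      apply pv_find?_congr
      intro q hq
      have hge := pvMins_le hq
      rcases pvScore_cases q.2 with ⟨_, h'⟩ | ⟨_, _, _, h'⟩ | ⟨_, _, hid', h'⟩ | ⟨_, _, hid', h'⟩
      · omega
      · omega
      · rw [hid', h', h32]; simp
      · rw [hid', h', h32]
        have hu : PySem.Str.endswith q.2 "_id" = false := by
          cases hu : PySem.Str.endswith q.2 "_id"
          · rfl
          · rw [pv_endswith_id q.2 hu] at hid'; cases hid'
        rw [hu]; simp
    have hsome : (l.find? (fun q => pvScore q.2 == pvMins l)).isSome :=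
      List.find?_isSome.mpr ⟨q₀, hq₀, by simp [hsc]⟩
    obtain ⟨p, hp⟩ := Option.isSome_iff_exists.mp hsome
    rw [hexact, haffix, hcongr, hp]
    unfold pvFamin
    rw [hp]
    rfl
  · -- phase 3: nothing matches anywhere, pvMins l = 48, fall back to the head
    rw [hsc] at h48
    have hall : ∀ q ∈ l, pvEIdx q.2 = none ∧ pvAIdx q.2 = none ∧
        PySem.Str.endswith q.2 "id" = false ∧ pvScore q.2 = 48 := by
      intro q hq
      have hge := pvMins_le hq
      rcases pvScore_cases q.2 with ⟨_, h'⟩ | ⟨_, _, _, h'⟩ | ⟨_, _, _, h'⟩ | ⟨he', ha', hid', h'⟩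
      · omega
      · omega
      · omega
      · exact ⟨he', ha', hid', h'⟩
    have hexact : pvHintLoop pvExactMatch pvHints l = none :=
      pvHintLoop_none _ _ _ (fun q hq => by rw [pvIdx_exact]; exact (hall q hq).1)
    have haffix : pvHintLoop pvAffixMatch pvHints l = none :=
      pvHintLoop_none _ _ _ (fun q hq => by rw [pvIdx_affix]; exact (hall q hq).2.1)
    have hfind : l.find? (fun p =>
        PySem.Str.endswith p.2 "id" || PySem.Str.endswith p.2 "_id") = none := by
      rw [List.find?_eq_none]
      intro q hq
      obtain ⟨_, _, hid', _⟩ := hall q hq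
      have hu : PySem.Str.endswith q.2 "_id" = false := by
        cases hu : PySem.Str.endswith q.2 "_id"
        · rfl
        · rw [pv_endswith_id q.2 hu] at hid'; cases hid'
      rw [hid', hu]; simp
    obtain ⟨p, rest, rfl⟩ := List.exists_cons_of_ne_nil hne
    rw [hexact, haffix, hfind]
    unfold pvFamin
    simp only [List.find?_cons]
    rw [show (pvScore p.2 == pvMins (p :: rest)) = true by
      simp; exact ((hall p List.mem_cons_self).2.2.2).trans h48.symm]
    rfl

-- ===== VERDICT (by name: the statement is the Claim_ definition above) =====
theorem choose_identifier_column_py_spec : Claim_equal_choose_identifier_column_py := by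
  intro column_names _
  unfold Spec_choose_identifier_column_py
  unfold choose_identifier_column_py choose_identifier_column_py_alt
  cases hn : pvNormalize column_names with
  | nil => simp
  | cons p rest =>
    simp only [List.isEmpty_cons, if_neg (by decide : ¬ false = true)]
    rw [← pvAlt_famin p rest]
    exact pvA_famin (p :: rest) (List.cons_ne_nil p rest)
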